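-- pv_equiv track=rewrite | github.com/omnp/shiny-spoon | php.py | php
-- ===== SOURCE A (Python) =====
-- def php(m, n):
--     """Pigeon hole principle."""
--     k = m*n
--     vs = set(range(1,k+1))
--     xs = set()
--     for i in range(1,k+1, n):
--         x = tuple(range(i,i+n))
--         xs.add(x)
--     xs_ = set(xs)
--     for x in xs_:
--         for y in xs_:
--              if x != y:
--                  for e,f in zip(x,y):
--                      xs.add(tuple(sorted((-e,-f,),key=abs)))
--     return xs
-- ===== SOURCE B (Python) =====
-- def php(m, n):
--     """Pigeon hole principle."""
--     groups = [tuple(range(i, i + n)) for i in range(1, m * n + 1, n)]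
--     out = set(groups)
--     distinct = list(set(out))
--     while distinct:
--         x = distinct[0]
--         distinct = distinct[1:]
--         for y in distinct:
--             for e, f in zip(x, y):
--                 out.add((-min(e, f), -max(e, f)))
--     return out
-- ===== Notes on version B (the rewrite author's own statement) =====
-- stated objective: simpler
-- what changed: B drops A's set-dedup double loop over all ordered group pairs (each unordered pair generated twice and re-sorted by abs) and instead sweeps the group list head-by-tail, emitting each cross-group pair exactly once already in (-min,-max) order, so no sorted() call and no duplicate generation.
import Mathlib
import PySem

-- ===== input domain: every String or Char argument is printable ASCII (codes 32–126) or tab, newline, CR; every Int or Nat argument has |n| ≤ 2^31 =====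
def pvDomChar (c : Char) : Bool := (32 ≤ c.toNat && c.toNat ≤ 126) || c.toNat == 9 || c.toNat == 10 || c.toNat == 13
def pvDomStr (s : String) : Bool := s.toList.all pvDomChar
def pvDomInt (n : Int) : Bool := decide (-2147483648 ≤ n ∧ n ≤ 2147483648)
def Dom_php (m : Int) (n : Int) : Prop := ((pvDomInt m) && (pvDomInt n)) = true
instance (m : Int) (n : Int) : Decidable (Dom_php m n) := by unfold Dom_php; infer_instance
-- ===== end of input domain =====

-- B replaces A's all-ordered-pairs set loop (each unordered pair generated twice, re-sorted by
-- abs and deduplicated by the set) with a single head-and-tail sweep that emits each pair once,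
-- already in (-min,-max) order, so no sorted() call and no duplicate generation: simpler.

-- ===== PORT A =====
def php (m : Int) (n : Int) : List (List Int) :=
  let k := m * n
  let _vs : PySem.Set Int := PySem.Set.ofList (PySem.List.pyRange 1 (k + 1) 1)   -- vs (unused by A)
  let xs : PySem.Set (List Int) :=
    List.foldl (fun s i => PySem.Set.add s (PySem.List.pyRange i (i + n)))
      PySem.Set.empty (PySem.List.pyRange 1 (k + 1) n)
  List.foldl (fun acc x =>
      List.foldl (fun acc y =>
          if x ≠ y then
            List.foldl (fun acc ef =>
                PySem.Set.add acc (PySem.List.sorted [-ef.1, -ef.2] (fun z => |z|)))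
              acc (x.zip y)
          else acc)
        acc xs)
    xs xs

-- ===== PORT B =====
-- the while-loop of Source B: consume the group list head by head, pairing the head with the tail
def phpPairs : List (List Int) → PySem.Set (List Int) → PySem.Set (List Int)
  | [], out => out
  | x :: groups, out =>
      phpPairs groups
        (List.foldl (fun out y =>
            List.foldl (fun out ef =>
                PySem.Set.add out [-(min ef.1 ef.2), -(max ef.1 ef.2)]) out (x.zip y))
          out groups)

def php_alt (m : Int) (n : Int) : List (List Int) :=
  let groups := (PySem.List.pyRange 1 (m * n + 1) n).map (fun i => PySem.List.pyRange i (i + n))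
  let out := PySem.Set.ofList groups
  phpPairs (PySem.Set.ofList out) out

-- ===== PRECONDITION & SPEC =====
-- A raises ValueError ('range() arg 3 must not be zero') when n = 0; Pre_ excludes exactly that.
def Pre_php (m : Int) (n : Int) : Prop := n ≠ 0
instance (m : Int) (n : Int) : Decidable (Pre_php m n) := by unfold Pre_php; infer_instance
def pvWitness_php : Int × Int := (2, 2)

def Spec_php (m : Int) (n : Int) (out : List (List Int)) : Prop := out = php_alt m n
instance (m : Int) (n : Int) (out : List (List Int)) : Decidable (Spec_php m n out) := by unfold Spec_php; infer_instance

-- ===== CLAIM (what is proved, stated in full; the proofs are below) =====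
def Claim_equal_php : Prop := ∀ (m : Int) (n : Int), Dom_php m n → Pre_php m n → Spec_php m n (php m n)

-- ===== LEMMAS AND PROOFS =====

-- A's pair block for (x, y): negated, re-sorted by absolute value
def blkA (x y : List Int) : List (List Int) :=
  (x.zip y).map (fun ef => PySem.List.sorted [-ef.1, -ef.2] (fun z => |z|))

-- B's pair block for (x, y): negated, already in order
def blkB (x y : List Int) : List (List Int) :=
  (x.zip y).map (fun ef => [-(min ef.1 ef.2), -(max ef.1 ef.2)])

-- A's inner loop over the whole group list G, as a function of the current outer element x
def innerA (G : List (List Int)) (x : List Int) (acc : PySem.Set (List Int)) :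
    PySem.Set (List Int) :=
  List.foldl (fun acc y =>
      if x ≠ y then
        List.foldl (fun acc ef =>
            PySem.Set.add acc (PySem.List.sorted [-ef.1, -ef.2] (fun z => |z|)))
          acc (x.zip y)
      else acc)
    acc G

-- what the equivalence needs of two groups listed in this order
def GRel (x y : List Int) : Prop :=
  x ≠ y ∧ blkA x y = blkB x y ∧ blkA y x = blkB x y

-- membership is preserved by a fold of adds, and a fold of already-present adds is a no-op
lemma mem_foldl_add_left {e : List Int} {s : PySem.Set (List Int)} (l : List (List Int))
    (h : e ∈ s) : e ∈ List.foldl PySem.Set.add s l := by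
  induction l generalizing s with
  | nil => exact h
  | cons a l ih => exact ih ((PySem.Set.mem_add s a e).mpr (Or.inl h))

lemma mem_foldl_add_of_mem {e : List Int} {s : PySem.Set (List Int)} (l : List (List Int))
    (h : e ∈ l) : e ∈ List.foldl PySem.Set.add s l := by
  induction l generalizing s with
  | nil => cases h
  | cons a l ih =>
      rcases List.mem_cons.mp h with h | h
      · subst h; rw [List.foldl_cons]; exact mem_foldl_add_left _ ((PySem.Set.mem_add _ _ _).mpr (Or.inr rfl))
      · exact ih h

lemma foldl_add_absorb {s : PySem.Set (List Int)} {l : List (List Int)}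
    (h : ∀ e ∈ l, e ∈ s) : List.foldl PySem.Set.add s l = s := by
  induction l generalizing s with
  | nil => rfl
  | cons a l ih =>
      rw [List.foldl_cons, PySem.Set.add_of_mem (h a (by simp))]
      exact ih fun e he => h e (by simp [he])

-- B's inner loop, expressed on blocks
lemma innerB_eq (x : List Int) (rest : List (List Int)) (acc : PySem.Set (List Int)) :
    List.foldl (fun out y =>
        List.foldl (fun out ef =>
            PySem.Set.add out [-(min ef.1 ef.2), -(max ef.1 ef.2)]) out (x.zip y)) acc rest
      = List.foldl (fun out y => List.foldl PySem.Set.add out (blkB x y)) acc rest := by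
  simp [blkB, List.foldl_map]

-- membership in the accumulator survives B's inner loop
lemma mem_pairfold {e : List Int} {acc : PySem.Set (List Int)} (x : List Int)
    (rest : List (List Int)) (h : e ∈ acc) :
    e ∈ List.foldl (fun out y => List.foldl PySem.Set.add out (blkB x y)) acc rest := by
  induction rest generalizing acc with
  | nil => exact h
  | cons a rest ih => exact ih (mem_foldl_add_left _ h)

-- every element of a block whose partner is in the list ends up in the accumulator
lemma mem_pairfold_blk {e : List Int} {acc : PySem.Set (List Int)} (x x' : List Int)
    (rest : List (List Int)) (hx : x' ∈ rest) (he : e ∈ blkB x x') :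
    e ∈ List.foldl (fun out y => List.foldl PySem.Set.add out (blkB x y)) acc rest := by
  induction rest generalizing acc with
  | nil => cases hx
  | cons a rest ih =>
      rcases List.mem_cons.mp hx with h | h
      · subst h
        exact mem_pairfold x rest (mem_foldl_add_of_mem _ he)
      · exact ih h

-- A's loop body over one y, as in the port
def bodyA (x : List Int) (acc : PySem.Set (List Int)) (y : List Int) : PySem.Set (List Int) :=
  if x ≠ y then
    List.foldl (fun acc ef =>
        PySem.Set.add acc (PySem.List.sorted [-ef.1, -ef.2] (fun z => |z|)))
      acc (x.zip y)
  else acc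

lemma innerA_eq_foldl_bodyA (G : List (List Int)) (x : List Int) (acc : PySem.Set (List Int)) :
    innerA G x acc = List.foldl (bodyA x) acc G := rfl

lemma bodyA_eq_blkA {x y : List Int} (h : x ≠ y) (acc : PySem.Set (List Int)) :
    bodyA x acc y = List.foldl PySem.Set.add acc (blkA x y) := by
  rw [bodyA, if_pos h, blkA, List.foldl_map]

-- a pass of A over already-seen partners is a no-op
lemma noop_pass (x : List Int) (l : List (List Int)) (acc : PySem.Set (List Int))
    (hne : ∀ y ∈ l, x ≠ y) (hmem : ∀ y ∈ l, ∀ e ∈ blkA x y, e ∈ acc) :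
    List.foldl (bodyA x) acc l = acc := by
  induction l with
  | nil => rfl
  | cons y l ih =>
      rw [List.foldl_cons, bodyA_eq_blkA (hne y (by simp)),
        foldl_add_absorb (hmem y (by simp))]
      exact ih (fun y hy => hne y (by simp [hy])) (fun y hy => hmem y (by simp [hy]))

-- a pass of A over not-yet-seen partners is B's inner sweep
lemma fresh_pass (x : List Int) (l : List (List Int)) (acc : PySem.Set (List Int))
    (h : ∀ y ∈ l, GRel x y) :
    List.foldl (bodyA x) acc l
      = List.foldl (fun out y => List.foldl PySem.Set.add out (blkB x y)) acc l := by
  apply PySem.List.foldl_congr_mem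
  intro acc y hy
  rw [bodyA_eq_blkA (h y hy).1, (h y hy).2.1]

-- THE LOOP CORRESPONDENCE: A's remaining outer passes = B's remaining head-and-tail sweeps
lemma loop_eq (rest : List (List Int)) : ∀ (pre : List (List Int)) (acc : PySem.Set (List Int)),
    (pre ++ rest).Pairwise GRel →
    (∀ x ∈ rest, ∀ y ∈ pre, ∀ e ∈ blkB y x, e ∈ acc) →
    List.foldl (fun acc x => innerA (pre ++ rest) x acc) acc rest = phpPairs rest acc := by
  induction rest with
  | nil => intro pre acc _ _; rfl
  | cons x rest ih =>
      intro pre acc hp hinv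
      have hxr : (x :: rest).Sublist (pre ++ x :: rest) := List.sublist_append_right _ _
      have hxy : ∀ y ∈ rest, GRel x y := by
        rw [List.pairwise_append, List.pairwise_cons] at hp
        exact hp.2.1.1
      have hyx : ∀ y ∈ pre, GRel y x := by
        rw [List.pairwise_append] at hp
        exact fun y hy => hp.2.2 y hy x (by simp)
      -- Step A: A's pass at x collapses to B's inner sweep over the tail
      have hstep : innerA (pre ++ x :: rest) x acc
          = List.foldl (fun out y => List.foldl PySem.Set.add out (blkB x y)) acc rest := by
        rw [innerA_eq_foldl_bodyA, List.foldl_append, List.foldl_cons]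
        rw [noop_pass x pre acc (fun y hy => Ne.symm (hyx y hy).1)
          (fun y hy e he => hinv x (by simp) y hy e ((hyx y hy).2.2 ▸ he))]
        rw [show bodyA x acc x = acc by simp [bodyA]]
        exact fresh_pass x rest acc hxy
      set acc1 := List.foldl (fun out y => List.foldl PySem.Set.add out (blkB x y)) acc rest
        with hacc1
      -- Step B: B takes one step
      have hB : phpPairs (x :: rest) acc = phpPairs rest acc1 := by
        rw [phpPairs, innerB_eq]
      -- Step C: recurse with pre ++ [x]
      rw [List.foldl_cons, hstep, hB]
      have hG : pre ++ x :: rest = (pre ++ [x]) ++ rest := by simp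
      calc List.foldl (fun acc x' => innerA (pre ++ x :: rest) x' acc) acc1 rest
          = List.foldl (fun acc x' => innerA ((pre ++ [x]) ++ rest) x' acc) acc1 rest := by
            rw [hG]
        _ = phpPairs rest acc1 := by
            apply ih (pre ++ [x]) acc1 (hG ▸ hp)
            intro x' hx' y hy e he
            rcases List.mem_append.mp hy with hy | hy
            · exact mem_pairfold x rest (hinv x' (by simp [hx']) y hy e he)
            · rw [List.mem_singleton] at hy
              subst hy
              exact mem_pairfold_blk y x' rest hx' he

-- GRel holds for two groups with 1 ≤ i < i' and 1 ≤ n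
lemma group_eq_map {i n : Int} :
    PySem.List.pyRange i (i + n) = (List.range n.toNat).map (fun (k : Nat) => i + (k : Int)) := by
  rw [PySem.List.pyRange_one, show i + n - i = n by ring]

lemma rel_groups {n i i' : Int} (hn : 1 ≤ n) (hi : 1 ≤ i) (hii : i < i') :
    GRel (PySem.List.pyRange i (i + n)) (PySem.List.pyRange i' (i' + n)) := by
  have hzip : ∀ (a b : Int),
      (PySem.List.pyRange a (a + n)).zip (PySem.List.pyRange b (b + n))
        = (List.range n.toNat).map (fun (k : Nat) => (a + (k : Int), b + (k : Int))) := by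
    intro a b
    rw [group_eq_map, group_eq_map, List.zip_map']
  refine ⟨?_, ?_, ?_⟩
  · intro h
    have hn0 : n.toNat = n.toNat - 1 + 1 := by omega
    rw [group_eq_map, group_eq_map, hn0, List.range_succ_eq_map, List.map_cons,
      List.map_cons] at h
    simp only [List.cons.injEq] at h
    omega
  · rw [blkA, blkB, hzip, List.map_map, List.map_map]
    apply List.map_congr_left
    intro k hk
    simp only [Function.comp_apply]
    rw [min_eq_left (by omega : i + (k : Int) ≤ i' + (k : Int)),
      max_eq_right (by omega : i + (k : Int) ≤ i' + (k : Int))]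
    apply PySem.List.sorted_eq_self_of_pairwise
    rw [List.pairwise_pair, abs_neg, abs_neg, abs_of_nonneg (by omega : (0:Int) ≤ i + k),
      abs_of_nonneg (by omega : (0:Int) ≤ i' + k)]
    omega
  · rw [blkA, blkB, hzip, hzip, List.map_map, List.map_map]
    apply List.map_congr_left
    intro k hk
    simp only [Function.comp_apply]
    rw [min_eq_left (by omega : i + (k : Int) ≤ i' + (k : Int)),
      max_eq_right (by omega : i + (k : Int) ≤ i' + (k : Int))]
    apply PySem.List.sorted_eq_of_perm_of_pairwise_lt
    · exact List.Perm.swap _ _ _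
    · rw [List.pairwise_pair, abs_neg, abs_neg, abs_of_nonneg (by omega : (0:Int) ≤ i + k),
        abs_of_nonneg (by omega : (0:Int) ≤ i' + k)]
      omega

-- both ports, reshaped onto the shared distinct group list
lemma php_eq_loop (m n : Int) :
    php m n = List.foldl
        (fun acc x => innerA (PySem.Set.ofList ((PySem.List.pyRange 1 (m * n + 1) n).map
            (fun i => PySem.List.pyRange i (i + n)))) x acc)
        (PySem.Set.ofList ((PySem.List.pyRange 1 (m * n + 1) n).map
            (fun i => PySem.List.pyRange i (i + n))))
        (PySem.Set.ofList ((PySem.List.pyRange 1 (m * n + 1) n).map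
            (fun i => PySem.List.pyRange i (i + n)))) := by
  rw [php]
  rw [show (List.foldl (fun s i => PySem.Set.add s (PySem.List.pyRange i (i + n)))
        PySem.Set.empty (PySem.List.pyRange 1 (m * n + 1) n))
      = PySem.Set.ofList ((PySem.List.pyRange 1 (m * n + 1) n).map
          (fun i => PySem.List.pyRange i (i + n))) by
    rw [← PySem.Set.update_map_eq_foldl_add, PySem.Set.update_empty]]
  rfl

lemma php_alt_eq_loop (m n : Int) :
    php_alt m n = phpPairs
        (PySem.Set.ofList ((PySem.List.pyRange 1 (m * n + 1) n).map
            (fun i => PySem.List.pyRange i (i + n))))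
        (PySem.Set.ofList ((PySem.List.pyRange 1 (m * n + 1) n).map
            (fun i => PySem.List.pyRange i (i + n)))) := by
  rw [php_alt, PySem.Set.ofList_ofList]

lemma php_eq_alt_pos {m n : Int} (hn : 1 ≤ n) : php m n = php_alt m n := by
  have hp : ((PySem.List.pyRange 1 (m * n + 1) n).map
      (fun i => PySem.List.pyRange i (i + n))).Pairwise GRel := by
    rw [List.pairwise_map]
    have hlt : (PySem.List.pyRange 1 (m * n + 1) n).Pairwise (· < ·) := by
      rw [PySem.List.pyRange_of_pos 1 (m * n + 1) (by omega)]
      rw [List.pairwise_map]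
      apply List.Pairwise.imp _ List.pairwise_lt_range
      intro a b hab
      have := mul_lt_mul_of_pos_left (Int.ofNat_lt.mpr hab) (show (0:Int) < n by omega)
      omega
    apply List.Pairwise.imp_of_mem _ hlt
    intro a b ha _ hab
    exact rel_groups hn ((PySem.List.mem_pyRange_iff_of_pos (by omega) a).mp ha).1 hab
  have hnd : PySem.Set.ofList ((PySem.List.pyRange 1 (m * n + 1) n).map
        (fun i => PySem.List.pyRange i (i + n)))
      = (PySem.List.pyRange 1 (m * n + 1) n).map (fun i => PySem.List.pyRange i (i + n)) :=
    PySem.Set.ofList_eq_self_of_nodup _ (hp.imp fun h => h.1)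
  rw [php_eq_loop, php_alt_eq_loop, hnd]
  exact loop_eq _ [] _ (by rw [List.nil_append]; exact hp) (by intro x _ y hy; cases hy)

-- degenerate case n ≤ -1: every group is the empty tuple, no pair is ever formed
lemma innerA_of_nil (G : List (List Int)) (acc : PySem.Set (List Int)) :
    innerA G [] acc = acc := by
  rw [innerA_eq_foldl_bodyA]
  induction G with
  | nil => rfl
  | cons y G ih => rw [List.foldl_cons, show bodyA [] acc y = acc by simp [bodyA]]; exact ih

lemma loopA_of_nils (S : PySem.Set (List Int)) (L : List (List Int))
    (h : ∀ x ∈ L, x = []) : ∀ acc,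
    List.foldl (fun acc x => innerA S x acc) acc L = acc := by
  induction L with
  | nil => intro acc; rfl
  | cons x L ih =>
      intro acc
      rw [List.foldl_cons, h x (by simp), innerA_of_nil]
      exact ih (fun z hz => h z (by simp [hz])) acc

lemma phpPairs_of_nils (G : List (List Int)) (h : ∀ x ∈ G, x = []) :
    ∀ acc, phpPairs G acc = acc := by
  induction G with
  | nil => intro acc; rfl
  | cons x G ih =>
      intro acc
      rw [phpPairs, h x (by simp)]
      rw [show (List.foldl (fun out y =>
          List.foldl (fun out ef =>
              PySem.Set.add out [-(min ef.1 ef.2), -(max ef.1 ef.2)]) out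
            (List.zip ([] : List Int) y)) acc G) = acc by
        simp [List.zip_nil_left]]
      exact ih (fun z hz => h z (by simp [hz])) acc

lemma php_eq_alt_neg {m n : Int} (hn : n ≤ -1) : php m n = php_alt m n := by
  have hnil : ∀ x ∈ (PySem.List.pyRange 1 (m * n + 1) n).map
      (fun i => PySem.List.pyRange i (i + n)), x = [] := by
    intro x hx
    obtain ⟨i, _, rfl⟩ := List.mem_map.mp hx
    exact PySem.List.pyRange_one_eq_nil (by omega)
  rw [php_eq_loop, php_alt_eq_loop,
    phpPairs_of_nils _ (fun x hx => hnil x ((PySem.Set.mem_ofList _ x).mp hx)),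
    loopA_of_nils _ _ (fun x hx => hnil x ((PySem.Set.mem_ofList _ x).mp hx))]

-- ===== VERDICT (by name: the statement is the Claim_ definition above) =====
theorem php_spec : Claim_equal_php := by
  intro m n _ hpre
  unfold Spec_php
  rcases lt_or_gt_of_ne hpre with h | h
  · exact php_eq_alt_neg (by omega)
  · exact php_eq_alt_pos (by omega)
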